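-- pv_equiv track=rewrite | github.com/00Halfman00/algos_DS_JS | easyAlgos/strings/Python/add_binary.py | addManyBinaryStrs
-- ===== SOURCE A (Python) =====
-- def addManyBinaryStrs(digits: list[str]) -> str:
--     """
--     Job: Adds multiple binary strings and returns their sum.
--     Args: A list of binary strings.
--     Returns: The sum of the binary strings as a binary string.
--     """
--     max_len = max(map(len, digits))
--     i = max_len - 1
--     carry, sum, index, result = 0, 0, 0, ""
--
--     while i >= 0 or carry > 0:  # i = 3
--         sum = carry
--         for _, num in enumerate(digits):
--             index = (len(num) - 1) - (max_len - 1 - i)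
--             if index >= 0 and num[index] == "1":
--                 sum += 1
--
--         result = str(sum % 2) + result
--         carry = sum // 2
--
--         i -= 1
--
--     return result
-- ===== SOURCE B (Python) =====
-- def addManyBinaryStrs(digits: list[str]) -> str:
--     """
--     Job: Adds multiple binary strings and returns their sum.
--     Args: A list of binary strings.
--     Returns: The sum of the binary strings as a binary string.
--     """
--     max_len = max(map(len, digits))
--     total = 0
--     for num in digits:
--         value = 0
--         for ch in num:
--             value = value * 2 + (1 if ch == "1" else 0)
--         total += value
--     bits = []
--     while total > 0:
--         bits.append("1" if total % 2 != 0 else "0")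
--         total //= 2
--     while len(bits) < max_len:
--         bits.append("0")
--     return "".join(reversed(bits))
-- ===== Notes on version B (the rewrite author's own statement) =====
-- stated objective: faster
-- what changed: A rescans every string once per output column and prepends to the result string (O(n*L) scans plus O(L^2) string building); B converts each string to an integer by one Horner pass, adds them, and emits the binary digits of the total with div/mod plus left zero-padding in one sweep.
import Mathlib
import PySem

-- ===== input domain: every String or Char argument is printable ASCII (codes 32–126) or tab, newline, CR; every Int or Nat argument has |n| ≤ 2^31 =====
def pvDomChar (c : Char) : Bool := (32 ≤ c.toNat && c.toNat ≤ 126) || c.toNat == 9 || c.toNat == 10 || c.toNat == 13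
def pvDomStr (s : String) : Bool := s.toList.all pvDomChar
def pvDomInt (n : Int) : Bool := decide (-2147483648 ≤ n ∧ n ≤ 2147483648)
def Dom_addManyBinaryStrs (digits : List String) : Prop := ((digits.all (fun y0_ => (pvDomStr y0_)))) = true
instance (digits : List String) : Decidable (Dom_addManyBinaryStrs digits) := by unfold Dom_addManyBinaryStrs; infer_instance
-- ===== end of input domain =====

-- B replaces A's per-column rescan of every string and O(L^2) string prepending by one numeric
-- Horner pass per string, an integer sum, and a single div/mod conversion with left padding.

-- ===== PORT A =====
-- the inner 'for _, num in enumerate(digits)' accumulation of A, starting from carry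
def pvColSum (digits : List String) (maxLen i carry : Int) : Int :=
  (PySem.List.enumerate digits).foldl
    (fun s p =>
      let index := PySem.Str.len p.2 - 1 - (maxLen - 1 - i)
      if 0 ≤ index ∧ PySem.Str.pyGet? p.2 index = some '1' then s + 1 else s)
    carry

-- termination fact for A's while loop: once i < 0 no column is in range, so the fold adds nothing
theorem pvColSum_noop (digits : List String) (maxLen i carry : Int)
    (h : ∀ s ∈ digits, PySem.Str.len s ≤ maxLen) (hi : i < 0) :
    pvColSum digits maxLen i carry = carry := by
  unfold pvColSum
  have hmem : ∀ p ∈ PySem.List.enumerate digits 0, p.2 ∈ digits := by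
    intro p hp
    rcases (PySem.List.mem_enumerate_iff digits 0 p).1 hp with ⟨k, hk, rfl⟩
    exact List.getElem_mem hk
  generalize PySem.List.enumerate digits 0 = l at hmem
  induction l generalizing carry with
  | nil => rfl
  | cons p t ih =>
      simp only [List.foldl_cons]
      rw [if_neg, ih]
      · intro q hq; exact hmem q (List.mem_cons_of_mem _ hq)
      · rintro ⟨h1, -⟩
        have := h p.2 (hmem p (List.mem_cons_self))
        omega

-- A's while loop; h records that maxLen bounds every length (true at the call site, used for termination)
def pvAIter (digits : List String) (maxLen : Int)
    (h : ∀ s ∈ digits, PySem.Str.len s ≤ maxLen) (i carry : Int) (result : String) : String :=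
  if _hc : 0 ≤ i ∨ 0 < carry then
    let sum := pvColSum digits maxLen i carry
    pvAIter digits maxLen h (i - 1) (PySem.Int.floordiv sum 2)
      (PySem.Int.toStr (PySem.Int.mod sum 2) ++ result)
  else result
termination_by ((i + 1).toNat, carry.toNat)
decreasing_by
  rcases le_or_gt 0 i with h0 | h0
  · exact Prod.Lex.left _ _ (by omega)
  · have hs : pvColSum digits maxLen i carry = carry := pvColSum_noop _ _ _ _ h (by omega)
    have hcar : 0 < carry := by omega
    have : PySem.Int.floordiv (pvColSum digits maxLen i carry) 2 = carry / 2 := by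
      rw [hs, PySem.Int.floordiv_eq_ediv_of_pos (by omega)]
    rw [show (i - 1 + 1).toNat = (i + 1).toNat by omega, this]
    exact Prod.Lex.right _ (by omega)

def addManyBinaryStrs (digits : List String) : String :=
  match hm : PySem.List.max? (digits.map (fun s => PySem.Str.len s)) (fun x => x) with
  | none => ""   -- Python raises ValueError (max of empty) here; excluded by Pre_
  | some maxLen =>
      pvAIter digits maxLen
        (fun s hs => PySem.List.max?_isMax hm (PySem.Str.len s) (List.mem_map_of_mem hs))
        (maxLen - 1) 0 ""

-- ===== PORT B =====
def pvValue (num : String) : Int :=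
  num.toList.foldl (fun v c => v * 2 + (if c = '1' then 1 else 0)) 0

def pvToBits (total : Int) : List String :=
  if _h : 0 < total then
    (if PySem.Int.mod total 2 ≠ 0 then "1" else "0") :: pvToBits (PySem.Int.floordiv total 2)
  else []
termination_by total.toNat
decreasing_by rw [PySem.Int.floordiv_eq_ediv_of_pos (by omega)]; omega

def pvPadBits (bits : List String) (maxLen : Int) : List String :=
  if (bits.length : Int) < maxLen then pvPadBits (bits ++ ["0"]) maxLen else bits
termination_by (maxLen - bits.length).toNat
decreasing_by simp only [List.length_append, List.length_cons, List.length_nil]; omega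

def addManyBinaryStrs_alt (digits : List String) : String :=
  match PySem.List.max? (digits.map (fun s => PySem.Str.len s)) (fun x => x) with
  | none => ""   -- max of an empty list raises in B too; excluded by Pre_
  | some maxLen =>
      let total := digits.foldl (fun t num => t + pvValue num) 0
      PySem.Str.join "" (pvPadBits (pvToBits total) maxLen).reverse

-- ===== PRECONDITION & SPEC =====
-- Pre_ excludes only the empty list, on which both A and B raise ValueError (max() of empty sequence).
def Pre_addManyBinaryStrs (digits : List String) : Prop := digits ≠ []
instance (digits : List String) : Decidable (Pre_addManyBinaryStrs digits) := by
  unfold Pre_addManyBinaryStrs; infer_instance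

def pvWitness_addManyBinaryStrs : List String := ["101", "11", "1"]

def Spec_addManyBinaryStrs (digits : List String) (out : String) : Prop := out = addManyBinaryStrs_alt digits
instance (digits : List String) (out : String) : Decidable (Spec_addManyBinaryStrs digits out) := by
  unfold Spec_addManyBinaryStrs; infer_instance

-- ===== CLAIM (what is proved, stated in full; the proofs are below) =====
def Claim_equal_addManyBinaryStrs : Prop := ∀ (digits : List String), Dom_addManyBinaryStrs digits → Pre_addManyBinaryStrs digits → Spec_addManyBinaryStrs digits (addManyBinaryStrs digits)

-- ===== LEMMAS AND PROOFS =====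

-- value of a bit list, MSB first (Nat mirror of pvValue)
def pvVN (l : List Char) : Nat := l.foldl (fun v c => 2 * v + (if c = '1' then 1 else 0)) 0
-- binary digits of n, least significant first
def pvLSB (n : Nat) : List Char :=
  if h : 0 < n then (if n % 2 = 1 then '1' else '0') :: pvLSB (n / 2) else []
-- the grand total and the per-column partial sums
def pvT (digits : List String) : Nat := (digits.map (fun s => pvVN s.toList)).sum
def pvHi (digits : List String) (p : Nat) : Nat := (digits.map (fun s => pvVN s.toList / 2 ^ p)).sum
-- MSB-first digits of m, left-padded with '0' to at least r characters
def pvPadRev (r m : Nat) : List Char := List.replicate (r - (pvLSB m).length) '0' ++ (pvLSB m).reverse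

theorem pvVN_snoc (l : List Char) (c : Char) :
    pvVN (l ++ [c]) = 2 * pvVN l + (if c = '1' then 1 else 0) := by
  simp [pvVN]

theorem pvVN_lt (l : List Char) : pvVN l < 2 ^ l.length := by
  induction l using List.reverseRecOn with
  | nil => simp [pvVN]
  | append_singleton l c ih =>
      rw [pvVN_snoc]
      simp only [List.length_append, List.length_cons, List.length_nil, pow_succ]
      split <;> omega

theorem pvVN_bit (l : List Char) (p : Nat) :
    pvVN l / 2 ^ p % 2 = if p < l.length ∧ l[l.length - 1 - p]? = some '1' then 1 else 0 := by
  induction l using List.reverseRecOn generalizing p with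
  | nil => simp [pvVN]
  | append_singleton l c ih =>
      rw [pvVN_snoc]
      cases p with
      | zero =>
          simp only [pow_zero, Nat.div_one, List.length_append, List.length_cons,
            List.length_nil, Nat.add_sub_cancel, Nat.sub_zero]
          rw [List.getElem?_append_right (by omega)]
          simp only [Nat.sub_self, List.getElem?_cons_zero]
          have : (2 * pvVN l + (if c = '1' then 1 else 0)) % 2 = (if c = '1' then 1 else 0) := by
            split <;> omega
          rw [this]
          by_cases hc : c = '1' <;> simp [hc]
      | succ p =>
          have h2 : 2 * pvVN l + (if c = '1' then 1 else 0) < 2 ^ (l.length + 1) := by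
            have := pvVN_lt (l ++ [c]); rw [pvVN_snoc] at this; simpa using this
          have hdiv : (2 * pvVN l + (if c = '1' then 1 else 0)) / 2 ^ (p + 1) = pvVN l / 2 ^ p := by
            rw [pow_succ', ← Nat.div_div_eq_div_mul]
            congr 1
            split <;> omega
          rw [hdiv, ih p]
          simp only [List.length_append, List.length_cons, List.length_nil]
          by_cases hp : p < l.length
          · rw [show l.length + 1 - 1 - (p + 1) = l.length - 1 - p by omega,
              List.getElem?_append_left (by omega)]
            simp only [show (p + 1 < l.length + (0 + 1) ∧ l[l.length - 1 - p]? = some '1') ↔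
                (p < l.length ∧ l[l.length - 1 - p]? = some '1') from by
              constructor <;> (rintro ⟨h1, h2⟩; exact ⟨by omega, h2⟩)]
          · simp only [hp, false_and, if_false]
            rw [if_neg]; rintro ⟨h1, -⟩; omega

theorem pvValue_aux (l : List Char) (a : Nat) :
    l.foldl (fun v c => v * 2 + (if c = '1' then 1 else 0)) ((a : Nat) : Int) =
      ((l.foldl (fun v c => 2 * v + (if c = '1' then 1 else 0)) a : Nat) : Int) := by
  induction l generalizing a with
  | nil => rfl
  | cons c t ih =>
      simp only [List.foldl_cons]
      rw [show ((a : Int) * 2 + (if c = '1' then 1 else 0)) =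
        (((2 * a + (if c = '1' then 1 else 0) : Nat) : Nat) : Int) by push_cast; split <;> ring]
      exact ih _

theorem pvValue_eq (num : String) : pvValue num = ((pvVN num.toList : Nat) : Int) := by
  simpa using pvValue_aux num.toList 0

theorem pvTotal_aux (l : List String) (t : Nat) :
    l.foldl (fun t num => t + pvValue num) ((t : Nat) : Int) = ((t + pvT l : Nat) : Int) := by
  induction l generalizing t with
  | nil => simp [pvT]
  | cons s r ih =>
      simp only [List.foldl_cons]
      rw [pvValue_eq, show ((t : Int) + ((pvVN s.toList : Nat) : Int)) =
        (((t + pvVN s.toList : Nat) : Nat) : Int) by push_cast; ring, ih]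
      congr 1
      simp [pvT]; ring

theorem pvTotal_eq (digits : List String) :
    digits.foldl (fun t num => t + pvValue num) 0 = ((pvT digits : Nat) : Int) := by
  simpa using pvTotal_aux digits 0

theorem pvColSum_eq (digits : List String) (L r p c : Nat) (hL : p + r + 1 = L) :
    pvColSum digits (L : Int) (r : Int) (c : Int) =
      ((c + (digits.map (fun s => pvVN s.toList / 2 ^ p % 2)).sum : Nat) : Int) := by
  unfold pvColSum
  suffices H : ∀ (l : List String) (k : Int) (c : Nat),
      (PySem.List.enumerate l k).foldl
        (fun s q =>
          let index := PySem.Str.len q.2 - 1 - ((L : Int) - 1 - (r : Int))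
          if 0 ≤ index ∧ PySem.Str.pyGet? q.2 index = some '1' then s + 1 else s) (c : Int) =
        ((c + (l.map (fun s => pvVN s.toList / 2 ^ p % 2)).sum : Nat) : Int) from H digits 0 c
  intro l
  induction l with
  | nil => intro k c; simp
  | cons w t ih =>
      intro k c
      rw [PySem.List.enumerate_cons, List.foldl_cons]
      have hstep : (if 0 ≤ PySem.Str.len w - 1 - ((L : Int) - 1 - (r : Int)) ∧
            PySem.Str.pyGet? w (PySem.Str.len w - 1 - ((L : Int) - 1 - (r : Int))) = some '1'
          then (c : Int) + 1 else (c : Int)) =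
          ((c + pvVN w.toList / 2 ^ p % 2 : Nat) : Int) := by
        rw [pvVN_bit]
        by_cases hp : p < w.toList.length
        · have hidx : PySem.Str.len w - 1 - ((L : Int) - 1 - (r : Int)) =
              ((w.toList.length - 1 - p : Nat) : Int) := by
            rw [PySem.Str.len_eq]; omega
          rw [hidx, PySem.Str.pyGet?_natCast]
          by_cases hg : w.toList[w.toList.length - 1 - p]? = some '1'
          · rw [if_pos ⟨by positivity, hg⟩, if_pos ⟨hp, hg⟩]; push_cast; ring
          · rw [if_neg (by rintro ⟨-, h2⟩; exact hg h2), if_neg (by rintro ⟨-, h2⟩; exact hg h2)]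
            simp
        · have hneg : ¬ (0 ≤ PySem.Str.len w - 1 - ((L : Int) - 1 - (r : Int))) := by
            rw [PySem.Str.len_eq]
            have : w.toList.length ≤ p := by omega
            omega
          rw [if_neg (by rintro ⟨h1, -⟩; exact hneg h1), if_neg (by rintro ⟨h1, -⟩; exact hp h1)]
          simp
      rw [hstep, ih (k + 1) (c + pvVN w.toList / 2 ^ p % 2)]
      congr 1
      simp only [List.map_cons, List.sum_cons]
      omega

theorem pvHi_split (digits : List String) (p : Nat) :
    (digits.map (fun s => pvVN s.toList / 2 ^ p % 2)).sum + 2 * pvHi digits (p + 1) = pvHi digits p := by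
  induction digits with
  | nil => simp [pvHi]
  | cons s r ih =>
      simp only [pvHi, List.map_cons, List.sum_cons] at *
      have hv : pvVN s.toList / 2 ^ p % 2 + 2 * (pvVN s.toList / 2 ^ (p + 1)) = pvVN s.toList / 2 ^ p := by
        rw [pow_succ, ← Nat.div_div_eq_div_mul]
        omega
      omega

theorem pvHi_zero (digits : List String) : pvHi digits 0 = pvT digits := by
  simp [pvHi, pvT]

theorem pvHi_top (digits : List String) (L : Nat)
    (h : ∀ s ∈ digits, PySem.Str.len s ≤ (L : Int)) : pvHi digits L = 0 := by
  unfold pvHi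
  apply List.sum_eq_zero
  intro x hx
  rcases List.mem_map.1 hx with ⟨s, hs, rfl⟩
  have hlen : s.toList.length ≤ L := by
    have := h s hs; rw [PySem.Str.len_eq] at this; exact_mod_cast this
  exact Nat.div_eq_of_lt (lt_of_lt_of_le (pvVN_lt _) (Nat.pow_le_pow_right (by norm_num) hlen))

theorem pvPadRev_step (m r : Nat) :
    pvPadRev (r + 1) m = pvPadRev r (m / 2) ++ [if m % 2 = 1 then '1' else '0'] := by
  by_cases hm : 0 < m
  · have hLc : pvLSB m = (if m % 2 = 1 then '1' else '0') :: pvLSB (m / 2) := by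
      conv_lhs => rw [pvLSB]
      exact dif_pos hm
    unfold pvPadRev
    rw [hLc]
    simp only [List.length_cons, List.reverse_cons]
    rw [show r + 1 - ((pvLSB (m / 2)).length + 1) = r - (pvLSB (m / 2)).length by omega,
      ← List.append_assoc]
  · have h0 : m = 0 := by omega
    subst h0
    have hL0 : pvLSB 0 = [] := by rw [pvLSB]; exact dif_neg (by omega)
    simp only [pvPadRev, Nat.zero_div, hL0, List.length_nil, Nat.sub_zero, List.reverse_nil,
      List.append_nil]
    rw [List.replicate_succ']
    simp

theorem pvAIter_neg (digits : List String) (maxLen : Int)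
    (h : ∀ s ∈ digits, PySem.Str.len s ≤ maxLen) (c : Nat) (i : Int) (hi : i < 0) (acc : String) :
    (pvAIter digits maxLen h i (c : Int) acc).toList = (pvLSB c).reverse ++ acc.toList := by
  induction c using Nat.strong_induction_on generalizing i acc with
  | _ c ih =>
    rw [pvAIter]
    by_cases hc : 0 < c
    · rw [dif_pos (Or.inr (by exact_mod_cast hc))]
      have hs := pvColSum_noop digits maxLen i (c : Int) h hi
      simp only [hs]
      have h2 : PySem.Int.floordiv (c : Int) 2 = ((c / 2 : Nat) : Int) := by
        rw [PySem.Int.floordiv_eq_ediv_of_pos (by omega)]; omega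
      have h3 : PySem.Int.mod (c : Int) 2 = ((c % 2 : Nat) : Int) := by
        rw [PySem.Int.mod_eq_emod_of_pos (by omega)]; omega
      rw [h2, h3, ih (c / 2) (by omega) (i - 1) (by omega)]
      have hstr : (PySem.Int.toStr ((c % 2 : Nat) : Int)).toList = [if c % 2 = 1 then '1' else '0'] := by
        rcases Nat.mod_two_eq_zero_or_one c with hm | hm <;> rw [hm] <;> decide
      rw [String.toList_append, hstr]
      have hLc : pvLSB c = (if c % 2 = 1 then '1' else '0') :: pvLSB (c / 2) := by
        conv_lhs => rw [pvLSB]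
        exact dif_pos hc
      rw [hLc, List.reverse_cons, List.append_assoc]
    · have h0 : c = 0 := by omega
      subst h0
      have hcond : ¬ (0 ≤ i ∨ 0 < (((0 : Nat) : Int))) := by omega
      rw [dif_neg hcond]
      have hL0 : pvLSB 0 = [] := by rw [pvLSB]; exact dif_neg (by omega)
      simp [hL0]

theorem pvAIter_main (digits : List String) (L : Nat)
    (h : ∀ s ∈ digits, PySem.Str.len s ≤ (L : Int)) (r : Nat) (hr : r ≤ L) (c : Nat)
    (hinv : c + pvHi digits (L - r) = pvT digits / 2 ^ (L - r)) (acc : String) :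
    (pvAIter digits (L : Int) h ((r : Int) - 1) (c : Int) acc).toList =
      pvPadRev r (pvT digits / 2 ^ (L - r)) ++ acc.toList := by
  induction r generalizing c acc with
  | zero =>
      rw [show ((0 : Nat) : Int) - 1 = -1 by norm_num,
        pvAIter_neg digits (L : Int) h c (-1) (by norm_num) acc]
      have hc : c = pvT digits / 2 ^ (L - 0) := by
        have htop := pvHi_top digits L h
        rw [Nat.sub_zero] at hinv ⊢
        omega
      rw [hc]
      simp [pvPadRev]
  | succ r ih =>
      have hcast : ((r + 1 : Nat) : Int) - 1 = (r : Int) := by push_cast; ring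
      rw [hcast, pvAIter, dif_pos (Or.inl (by positivity))]
      have hpL : (L - (r + 1)) + r + 1 = L := by omega
      have hcs := pvColSum_eq digits L r (L - (r + 1)) c hpL
      simp only [hcs]
      set p := L - (r + 1) with hp
      set sm := c + (digits.map (fun s => pvVN s.toList / 2 ^ p % 2)).sum with hsm
      have h2 : PySem.Int.floordiv ((sm : Nat) : Int) 2 = ((sm / 2 : Nat) : Int) := by
        rw [PySem.Int.floordiv_eq_ediv_of_pos (by omega)]; omega
      have h3 : PySem.Int.mod ((sm : Nat) : Int) 2 = ((sm % 2 : Nat) : Int) := by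
        rw [PySem.Int.mod_eq_emod_of_pos (by omega)]; omega
      have hsplit := pvHi_split digits p
      have hTp : pvT digits / 2 ^ (p + 1) = pvT digits / 2 ^ p / 2 := by
        rw [pow_succ, ← Nat.div_div_eq_div_mul]
      have hLr : L - r = p + 1 := by omega
      have hkey : sm + 2 * pvHi digits (p + 1) = pvT digits / 2 ^ p := by omega
      have hinv' : sm / 2 + pvHi digits (L - r) = pvT digits / 2 ^ (L - r) := by
        rw [hLr, hTp]; omega
      rw [h2, h3, ih (by omega) (sm / 2) hinv' _]
      have hd : sm % 2 = pvT digits / 2 ^ p % 2 := by omega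
      have hstr : (PySem.Int.toStr ((sm % 2 : Nat) : Int)).toList =
          [if pvT digits / 2 ^ p % 2 = 1 then '1' else '0'] := by
        rw [hd]
        rcases Nat.mod_two_eq_zero_or_one (pvT digits / 2 ^ p) with hm | hm <;> rw [hm] <;> decide
      rw [String.toList_append, hstr, hLr, hTp,
        pvPadRev_step (pvT digits / 2 ^ p) r, List.append_assoc]

theorem pvToBits_eq (n : Nat) :
    (pvToBits (n : Int)).map String.toList = (pvLSB n).map (fun c => [c]) := by
  induction n using Nat.strong_induction_on with
  | _ n ih =>
    by_cases hn : 0 < n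
    · have hT : pvToBits (n : Int) = (if PySem.Int.mod (n : Int) 2 ≠ 0 then "1" else "0") ::
          pvToBits (PySem.Int.floordiv (n : Int) 2) := by
        conv_lhs => rw [pvToBits]
        exact dif_pos (by exact_mod_cast hn)
      have h2 : PySem.Int.floordiv (n : Int) 2 = ((n / 2 : Nat) : Int) := by
        rw [PySem.Int.floordiv_eq_ediv_of_pos (by omega)]; omega
      have h3 : PySem.Int.mod (n : Int) 2 = ((n % 2 : Nat) : Int) := by
        rw [PySem.Int.mod_eq_emod_of_pos (by omega)]; omega
      have hL : pvLSB n = (if n % 2 = 1 then '1' else '0') :: pvLSB (n / 2) := by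
        conv_lhs => rw [pvLSB]
        exact dif_pos hn
      rw [hT, h2, hL, List.map_cons, List.map_cons, ih (n / 2) (by omega)]
      congr 1
      rw [h3]
      rcases Nat.mod_two_eq_zero_or_one n with hm | hm <;> rw [hm] <;> decide
    · have h0 : n = 0 := by omega
      subst h0
      have hT0 : pvToBits ((0 : Nat) : Int) = [] := by
        rw [pvToBits]; exact dif_neg (by omega)
      have hL0 : pvLSB 0 = [] := by rw [pvLSB]; exact dif_neg (by omega)
      rw [hT0, hL0]; rfl

theorem pvPadBits_eq (bits : List String) (L : Int) :
    pvPadBits bits L = bits ++ List.replicate ((L - bits.length).toNat) "0" := by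
  induction bits using pvPadBits.induct L with
  | case1 bits hlt ih =>
      rw [pvPadBits, if_pos hlt, ih]
      have hk : (L - (bits.length : Int)).toNat = (L - ((bits ++ ["0"]).length : Int)).toNat + 1 := by
        simp only [List.length_append, List.length_cons, List.length_nil]
        push_cast; omega
      rw [hk, List.replicate_succ, List.append_assoc]
      rfl
  | case2 bits hge =>
      rw [pvPadBits, if_neg hge]
      have hk : (L - (bits.length : Int)).toNat = 0 := by omega
      simp [hk]

theorem pvJoin_toList (parts : List String) :
    (PySem.Str.join "" parts).toList = (parts.map String.toList).flatten := by
  simp only [PySem.Str.join]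
  induction parts with
  | nil => rfl
  | cons p t ih => cases t <;> simp_all [PySem.Chars.join, List.intercalate]

theorem pvFlatten_singles (l : List Char) :
    ((l.map (fun c => [c])).reverse).flatten = l.reverse := by
  induction l with
  | nil => rfl
  | cons c t ih => simp [ih]

theorem pvAlt_toList (T L : Nat) :
    (PySem.Str.join "" (pvPadBits (pvToBits (T : Int)) (L : Int)).reverse).toList = pvPadRev L T := by
  have hlen : (pvToBits (T : Int)).length = (pvLSB T).length := by
    have := congrArg List.length (pvToBits_eq T)
    simpa using this
  rw [pvJoin_toList, pvPadBits_eq, List.reverse_append, List.reverse_replicate, List.map_append,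
    List.map_replicate, List.map_reverse, List.flatten_append]
  have h1 : (List.replicate ((L : Int) - ((pvToBits (T : Int)).length : Int)).toNat
      ("0" : String).toList).flatten = List.replicate (L - (pvLSB T).length) '0' := by
    have hk : ((L : Int) - ((pvToBits (T : Int)).length : Int)).toNat = L - (pvLSB T).length := by
      rw [hlen]; omega
    rw [hk, show ("0" : String).toList = ['0'] from rfl]
    induction (L - (pvLSB T).length) with
    | zero => rfl
    | succ k ih => simp [List.replicate_succ, ih]
  rw [h1, show ((pvToBits (T : Int)).map String.toList).reverse =
      (((pvLSB T).map (fun c => [c])).reverse) by rw [pvToBits_eq], pvFlatten_singles]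
  rfl

-- ===== VERDICT (by name: the statement is the Claim_ definition above) =====
theorem addManyBinaryStrs_spec : Claim_equal_addManyBinaryStrs := by
  intro digits _ hpre
  unfold Spec_addManyBinaryStrs
  have hne : PySem.List.max? (digits.map (fun s => PySem.Str.len s)) (fun x => x) ≠ none := by
    intro hmax
    exact hpre (by simpa [List.map_eq_nil_iff] using (PySem.List.max?_eq_none_iff _ _).1 hmax)
  obtain ⟨maxLen, hm⟩ := Option.ne_none_iff_exists'.1 hne
  have hml : 0 ≤ maxLen := by
    rcases List.mem_map.1 (PySem.List.max?_mem hm) with ⟨s, -, rfl⟩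
    rw [PySem.Str.len_eq]; positivity
  have hA : addManyBinaryStrs digits = pvAIter digits maxLen
      (fun s hs => PySem.List.max?_isMax hm (PySem.Str.len s) (List.mem_map_of_mem hs))
      (maxLen - 1) 0 "" := by
    unfold addManyBinaryStrs
    split
    · rename_i heq; rw [hm] at heq; cases heq
    · rename_i m heq; rw [hm] at heq; cases heq; rfl
  have hB : addManyBinaryStrs_alt digits = PySem.Str.join ""
      (pvPadBits (pvToBits (digits.foldl (fun t num => t + pvValue num) 0)) maxLen).reverse := by
    unfold addManyBinaryStrs_alt
    split
    · rename_i heq; rw [hm] at heq; cases heq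
    · rename_i m heq; rw [hm] at heq; cases heq; rfl
  obtain ⟨L, hL⟩ : ∃ L : Nat, (L : Int) = maxLen := ⟨maxLen.toNat, Int.toNat_of_nonneg hml⟩
  subst hL
  rw [hA, hB, pvTotal_eq]
  apply String.toList_inj.1
  rw [pvAlt_toList (pvT digits) L]
  have h' : ∀ s ∈ digits, PySem.Str.len s ≤ (L : Int) :=
    fun s hs => PySem.List.max?_isMax hm (PySem.Str.len s) (List.mem_map_of_mem hs)
  have hmain := pvAIter_main digits L h' L le_rfl 0
    (by rw [Nat.sub_self, pvHi_zero, pow_zero, Nat.div_one]; omega) ""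
  rw [Nat.sub_self, pow_zero, Nat.div_one] at hmain
  simp only [Nat.cast_zero] at hmain
  rw [hmain]
  simp
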